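-- pv_equiv track=rewrite | github.com/fineman999/Algorithm | Programmers/Level1/fruit.py | solution
-- ===== SOURCE A (Python) =====
-- from collections import deque
--
-- def solution(k, m, score):
--     score.sort(reverse=True)
--     score = deque(score)
--
--     i = 0
--     answer = []
--     result = 0
--     while score:
--         if i == m:
--
--             i = 0
--             result += min(answer) * len(answer)
--             answer = []
--
--         else:
--             answer.append(score.popleft())
--             i += 1
--     if len(answer) == m:
--         result += min(answer) * len(answer)
--
--     return result
-- ===== SOURCE B (Python) =====
-- def solution(k, m, score):
--     s = sorted(score, reverse=True)
--     return sum(s[b * m + m - 1] * m for b in range(len(s) // m))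
-- ===== Notes on version B (the rewrite author's own statement) =====
-- stated objective: simpler
-- what changed: Replaces the deque loop that accumulates each box in a list and takes its min with a closed form: after the descending sort the minimum of full box b is the element at index b*m+m-1, so B sums those every-m-th elements directly over the n//m full boxes.
import Mathlib
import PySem

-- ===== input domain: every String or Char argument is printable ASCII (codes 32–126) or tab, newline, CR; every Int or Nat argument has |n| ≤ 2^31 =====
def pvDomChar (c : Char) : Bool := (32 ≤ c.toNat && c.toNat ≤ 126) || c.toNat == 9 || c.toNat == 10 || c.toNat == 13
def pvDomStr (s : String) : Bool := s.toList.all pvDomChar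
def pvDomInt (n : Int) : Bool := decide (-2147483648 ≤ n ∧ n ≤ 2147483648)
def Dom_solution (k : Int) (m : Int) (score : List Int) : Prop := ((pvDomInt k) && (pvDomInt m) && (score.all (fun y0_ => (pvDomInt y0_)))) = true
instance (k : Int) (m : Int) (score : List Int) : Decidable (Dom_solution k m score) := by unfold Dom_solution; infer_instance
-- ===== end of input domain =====

-- B replaces A's deque/accumulator loop with a direct sum over box indices (same asymptotics, simpler).
-- Equivalence is about the RETURN value only: Python A sorts `score` in place, B does not mutate it.

-- ===== PORT A =====
-- A's while-loop: state (i, answer, result), popping from the front of score;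
-- `none` = the ValueError of min([]) (reached exactly when m == 0)
def solutionLoop (m : Int) (score : List Int) (i : Int) (answer : List Int) (result : Int) : Option Int :=
  match score with
  | [] =>
    if (answer.length : Int) = m then
      match PySem.List.min? answer (fun y => y) with
      | none => none
      | some v => some (result + v * answer.length)
    else some result
  | x :: rest =>
    if i = m then
      match _h : PySem.List.min? answer (fun y => y) with
      | none => none
      | some v => solutionLoop m (x :: rest) 0 [] (result + v * answer.length)
    else
      solutionLoop m rest (i + 1) (answer ++ [x]) result
termination_by 3 * score.length + (if i = m then 1 else 0) + (if answer = [] then 0 else 1)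
decreasing_by
  · have hne : answer ≠ [] := by
      intro h; rw [h] at _h; simp [PySem.List.min?] at _h
    split_ifs <;> first | exact absurd (by assumption) hne | omega
  · simp only [List.length_cons]
    split_ifs <;> simp_all <;> omega

def solution (k : Int) (m : Int) (score : List Int) : Int :=
  (solutionLoop m (PySem.List.sorted score (fun y => y) true) 0 [] 0).getD 0

-- ===== PORT B =====
def solution_alt (k : Int) (m : Int) (score : List Int) : Int :=
  let s := PySem.List.sorted score (fun y => y) true
  (PySem.List.pyRange 0 (PySem.Int.floordiv s.length m) 1).foldl
    (fun acc b => acc + (PySem.List.pyGet? s (b * m + m - 1)).getD 0 * m) 0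

-- ===== PRECONDITION & SPEC =====
-- Pre_ excludes exactly m = 0, where A raises ValueError (min of an empty box) and B raises ZeroDivisionError.
def Pre_solution (k : Int) (m : Int) (score : List Int) : Prop := m ≠ 0
instance (k : Int) (m : Int) (score : List Int) : Decidable (Pre_solution k m score) := by unfold Pre_solution; infer_instance
def pvWitness_solution : Int × Int × List Int := (5, 3, [10, 9, 8, 7, 6, 5])

def Spec_solution (k : Int) (m : Int) (score : List Int) (out : Int) : Prop := out = solution_alt k m score
instance (k : Int) (m : Int) (score : List Int) (out : Int) : Decidable (Spec_solution k m score out) := by unfold Spec_solution; infer_instance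

-- ===== CLAIM (what is proved, stated in full; the proofs are below) =====
def Claim_equal_solution : Prop := ∀ (k : Int) (m : Int) (score : List Int), Dom_solution k m score → Pre_solution k m score → Spec_solution k m score (solution k m score)

-- ===== LEMMAS AND PROOFS =====

-- common specification: sum of min·(box size) over the full front-to-back boxes of size m
def boxSum (m : Nat) (l : List Int) : Int :=
  if h : 0 < m ∧ m ≤ l.length then
    ((PySem.List.min? (l.take m) (fun y => y)).getD 0) * m + boxSum m (l.drop m)
  else 0
termination_by l.length
decreasing_by simp; omega


-- A's loop computes result + boxSum of the not-yet-consumed part (answer ++ score)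
theorem loop_eq_boxSum (m : Int) (score : List Int) (i : Int) (answer : List Int) (result : Int) :
    1 ≤ m → i = (answer.length : Int) → i ≤ m →
    solutionLoop m score i answer result = some (result + boxSum m.toNat (answer ++ score)) := by
  fun_induction solutionLoop m score i answer result with
  | case1 i answer result hlen hnone =>
    intro hm hi hle
    rw [PySem.List.min?_eq_none_iff] at hnone
    subst hnone; simp at hlen; omega
  | case2 i answer result hlen v hsome =>
    intro hm hi hle
    have hml : m.toNat = answer.length := by omega
    rw [List.append_nil, boxSum, dif_pos (by omega), hml, List.take_length, hsome,
      List.drop_length, boxSum, dif_neg (by simp only [List.length_nil]; omega)]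
    simp only [Option.getD_some, Option.some.injEq]
    ring
  | case3 i answer result hlen =>
    intro hm hi hle
    rw [List.append_nil, boxSum, dif_neg (by omega)]
    simp
  | case4 answer result x rest hnone =>
    intro hm hieq hle
    rw [PySem.List.min?_eq_none_iff] at hnone
    subst hnone; simp at hieq; omega
  | case5 answer result x rest v hsome ih =>
    intro hm hieq hle
    have hml : m.toNat = answer.length := by omega
    rw [ih hm (by simp) (by omega)]
    simp only [List.nil_append]
    conv_rhs => rw [boxSum]
    rw [dif_pos ⟨by omega, by simp only [List.length_append, List.length_cons]; omega⟩, hml,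
      List.take_left, List.drop_left, hsome]
    simp only [Option.getD_some, Option.some.injEq]
    ring
  | case6 i answer result x rest hi ih =>
    intro hm hieq hle
    rw [ih hm (by simp [hieq]) (by omega)]
    simp

-- with a negative m the loop never flushes and returns result unchanged
theorem loop_eq_neg (m : Int) (hm : m < 0) (score : List Int) :
    ∀ (answer : List Int) (i result : Int), 0 ≤ i →
    solutionLoop m score i answer result = some result := by
  induction score with
  | nil =>
    intro answer i result hi
    rw [solutionLoop, if_neg (by omega)]
  | cons x rest ih =>
    intro answer i result hi
    rw [solutionLoop, if_neg (by omega)]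
    exact ih (answer ++ [x]) (i + 1) result (by omega)

-- min of a nonempty descending list is its last element
theorem foldl_min_desc (t : List Int) : ∀ (x : Int),
    List.Pairwise (fun a b => b ≤ a) (x :: t) →
    t.foldl min x = (x :: t).getLast (by simp) := by
  induction t with
  | nil => intro x _; simp
  | cons y t' ih =>
    intro x hp
    have hyx : y ≤ x := (List.pairwise_cons.mp hp).1 y (by simp)
    have hp' : List.Pairwise (fun a b => b ≤ a) (y :: t') := (List.pairwise_cons.mp hp).2
    simp only [List.foldl_cons, min_eq_right hyx]
    rw [ih y hp']
    simp [List.getLast_cons]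

theorem min?_desc (l : List Int) (hl : l ≠ []) (hs : List.Pairwise (fun a b => b ≤ a) l) :
    PySem.List.min? l (fun y => y) = some (l.getLast hl) := by
  cases l with
  | nil => exact absurd rfl hl
  | cons x t =>
    rw [PySem.List.min?_id_cons]
    rw [foldl_min_desc t x hs]

-- cast arithmetic for the box-minimum index
theorem cast_idx (b m : Nat) (hm : 0 < m) :
    (b : Int) * m + m - 1 = ((b * m + m - 1 : Nat) : Int) := by
  have h : (b * m + m - 1 : Nat) = b * m + (m - 1) := by omega
  rw [h]
  push_cast [Nat.cast_sub (by omega : 1 ≤ m)]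
  ring

-- B's indexed sum equals boxSum on a descending list
theorem sum_boxes (m : Nat) (s : List Int) :
    0 < m → List.Pairwise (fun a b => b ≤ a) s →
    ((List.range (s.length / m)).map
      (fun (b : Nat) => (PySem.List.pyGet? s (((b : Int)) * m + m - 1)).getD 0 * (m : Int))).sum = boxSum m s := by
  fun_induction boxSum m s with
  | case1 s h ih =>
    intro hm hs
    have hml : m ≤ s.length := h.2
    have hmlen : m - 1 < s.length := by omega
    have hq : s.length / m = (s.length - m) / m + 1 := Nat.div_eq_sub_div hm hml
    have hdl : (List.drop m s).length = s.length - m := by simp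
    have hhead : (PySem.List.pyGet? s ((0 : Int) * m + m - 1)).getD 0 = s[m-1]'hmlen := by
      rw [show ((0 : Int) * m + m - 1) = ((m - 1 : Nat) : Int) from by
        rw [Nat.cast_sub (by omega : 1 ≤ m)]; push_cast; ring]
      rw [PySem.List.pyGet?_natCast, List.getElem?_eq_getElem hmlen, Option.getD_some]
    have hmin : (PySem.List.min? (s.take m) (fun y => y)).getD 0 = s[m-1]'hmlen := by
      have hne : s.take m ≠ [] := by
        intro hc
        have := congrArg List.length hc
        simp [List.length_take] at this
        rcases this with h0 | h0
        · omega
        · rw [h0] at hml; simp at hml; omega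
      rw [min?_desc _ hne (List.Pairwise.sublist (List.take_sublist m s) hs), Option.getD_some,
        List.getLast_eq_getElem]
      simp [List.length_take, Nat.min_eq_left hml]
    have htail : ∀ b ∈ List.range ((s.length - m) / m),
        (PySem.List.pyGet? s (((b + 1 : Nat) : Int) * m + m - 1)).getD 0 * (m : Int) =
        (PySem.List.pyGet? (List.drop m s) ((b : Int) * m + m - 1)).getD 0 * m := by
      intro b hb
      rw [List.mem_range] at hb
      have hbm : (b + 1) * m ≤ s.length - m :=
        le_trans (Nat.mul_le_mul_right m (Nat.succ_le_of_lt hb)) (Nat.div_mul_le_self _ _)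
      have hsm : (b + 1) * m = b * m + m := by rw [Nat.succ_mul]
      have hL1 : (b + 1) * m + m - 1 < s.length := by omega
      have hL2 : b * m + m - 1 < (List.drop m s).length := by rw [hdl]; omega
      rw [cast_idx (b + 1) m hm, cast_idx b m hm, PySem.List.pyGet?_natCast,
        PySem.List.pyGet?_natCast, List.getElem?_eq_getElem hL1, List.getElem?_eq_getElem hL2,
        Option.getD_some, Option.getD_some, List.getElem_drop]
      simp only [show m + (b * m + m - 1) = (b + 1) * m + m - 1 from by omega]
    rw [hq, List.range_succ_eq_map, List.map_cons, List.sum_cons, List.map_map]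
    simp only [Function.comp_def, Nat.succ_eq_add_one, Nat.cast_zero]
    rw [hhead, List.map_congr_left htail, hmin]
    rw [show s.length - m = (List.drop m s).length from hdl.symm]
    rw [ih hm (List.Pairwise.sublist (List.drop_sublist m s) hs)]
  | case2 s h =>
    intro hm _
    rw [Nat.div_eq_of_lt (by omega)]
    simp

-- ===== VERDICT (by name: the statement is the Claim_ definition above) =====
theorem solution_spec : Claim_equal_solution := by
  intro k m score _ hpre
  unfold Spec_solution solution solution_alt
  have hs := PySem.List.sorted_pairwise_rev score (fun y => y)
  set s := PySem.List.sorted score (fun y => y) true with hsdef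
  dsimp only
  rcases lt_or_gt_of_ne hpre with hneg | hpos
  · rw [loop_eq_neg m hneg s [] 0 0 le_rfl]
    have hfd : PySem.Int.floordiv (s.length : Int) m ≤ 0 := by
      unfold PySem.Int.floordiv
      have h1 : 0 ≤ (s.length : Int) / (-m) := Int.ediv_nonneg (by positivity) (by omega)
      have h2 : (s.length : Int) / m = -((s.length : Int) / (-m)) := by
        rw [← Int.ediv_neg]; simp
      rw [Int.fdiv_eq_ediv]
      split_ifs <;> omega
    rw [PySem.List.pyRange_one_eq_nil hfd]
    simp
  · rw [loop_eq_boxSum m s 0 [] 0 (by omega) (by simp) (by omega)]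
    simp only [List.nil_append, Option.getD_some, zero_add]
    have hm0 : ((m.toNat : Nat) : Int) = m := Int.toNat_of_nonneg (by omega)
    have hfd : PySem.Int.floordiv (s.length : Int) m = ((s.length / m.toNat : Nat) : Int) := by
      unfold PySem.Int.floordiv
      rw [Int.fdiv_eq_ediv, if_pos (Or.inl (by omega))]
      rw [Int.natCast_ediv, hm0]
      ring
    rw [hfd, PySem.List.pyRange_one]
    rw [PySem.List.foldl_add]
    simp only [List.map_map, zero_add, Int.sub_zero, Int.toNat_natCast]
    rw [← sum_boxes m.toNat s (by omega) hs]
    congr 1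
    apply List.map_congr_left
    intro b _
    simp [hm0]
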